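-- pv_equiv track=rewrite | github.com/ericksoa/agentic-evolve | showcase/code-golf/32597951/gen0_initial.py | solve
-- ===== SOURCE A (Python) =====
-- def solve(grid):
--     rows = len(grid)
--     cols = len(grid[0])
--     result = [row[:] for row in grid]
--
--     # Find all cells with 8 to get the marked region
--     eights = [(r, c) for r in range(rows) for c in range(cols) if grid[r][c] == 8]
--
--     if not eights:
--         return result
--
--     # Find bounding box of 8s
--     min_r = min(r for r, c in eights)
--     max_r = max(r for r, c in eights)
--     min_c = min(c for r, c in eights)
--     max_c = max(c for r, c in eights)
--
--     # For cells inside the region marked by 8s, if original was 1 and now is 8,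
--     # we need to figure out what the pattern should be and mark differences as 3
--
--     # The pattern repeats - find repeating period
--     # Try to find what value should be at each position by looking at non-8 cells
--
--     for r, c in eights:
--         # Look for pattern outside the 8 region
--         # Find what value should be at this position based on periodicity
--
--         # Check if this cell should be 1 based on the pattern
--         # We look at equivalent positions outside the 8 region
--
--         # Try various periods to find the repeating pattern
--         for period_r in range(1, rows):
--             for period_c in range(1, cols):
--                 # Check multiple offsets
--                 found = False
--                 for dr in [-period_r, period_r]:
--                     nr = r + dr
--                     if 0 <= nr < rows:
--                         if grid[nr][c] != 8:
--                             if grid[nr][c] == 1: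
--                                 result[r][c] = 3
--                             found = True
--                             break
--                 if found:
--                     break
--             if found:
--                 break
--
--     return result
-- ===== SOURCE B (Python) =====
-- def solve(grid):
--     rows = len(grid)
--     cols = len(grid[0])
--     # per column: nearest[c][r] = (distance, value) of nearest vertical non-8, ties upward
--     nearest = []
--     for c in range(cols):
--         col = [grid[r][c] for r in range(rows)]
--         n = [None] * rows
--         last = None
--         for r in range(rows):              # downward sweep: nearest non-8 above
--             if last is not None:
--                 n[r] = (r - last[0], last[1])
--             if col[r] != 8:
--                 last = (r, col[r])
--         last = None
--         for r in range(rows - 1, -1, -1):  # upward sweep: nearest non-8 below, wins only if strictly closer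
--             if last is not None:
--                 d = last[0] - r
--                 if n[r] is None or d < n[r][0]:
--                     n[r] = (d, last[1])
--             if col[r] != 8:
--                 last = (r, col[r])
--         nearest.append(n)
--     return [[3 if c < cols and v == 8 and nearest[c][r] is not None and nearest[c][r][1] == 1 else v
--              for c, v in enumerate(row)]
--             for r, row in enumerate(grid)]
-- ===== Notes on version B (the rewrite author's own statement) =====
-- stated objective: alternative
-- what changed: Replaced A's per-8-cell nested period search (an outward distance scan re-run cols times per cell) by two linear sweeps per column that precompute each row's nearest vertical non-8 (ties upward), then an O(1) lookup per cell; not measurably faster on typical inputs since A's scan exits early.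
import Mathlib
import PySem

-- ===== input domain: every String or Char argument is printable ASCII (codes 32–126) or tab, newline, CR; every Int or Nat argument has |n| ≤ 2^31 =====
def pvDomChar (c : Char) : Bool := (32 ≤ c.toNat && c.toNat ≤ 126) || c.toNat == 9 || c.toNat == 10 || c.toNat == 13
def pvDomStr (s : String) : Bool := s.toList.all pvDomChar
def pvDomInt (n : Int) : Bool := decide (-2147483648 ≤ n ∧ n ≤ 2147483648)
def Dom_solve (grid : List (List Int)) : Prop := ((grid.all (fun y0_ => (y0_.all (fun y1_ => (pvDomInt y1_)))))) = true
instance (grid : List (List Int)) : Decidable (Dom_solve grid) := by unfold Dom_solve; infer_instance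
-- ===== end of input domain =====

-- B replaces A's per-8-cell nested period search by two linear sweeps per column that
-- precompute the nearest vertical non-8 entry (ties upward): a structurally different algorithm.


-- ===== PORT A =====
-- grid[r][c] for Nat indices (A only reads in-range cells under Pre_)
def cellA (grid : List (List Int)) (r c : Nat) : Int := (grid.getD r []).getD c 0

-- 'for dr in [-period_r, period_r]: …' — returns (found, whether result[r][c] was set to 3)
def drLoopA (grid : List (List Int)) (rows : Int) (r c : Nat) : List Int → Bool × Bool
  | [] => (false, false)
  | dr :: rest =>
      let nr : Int := (r : Int) + dr
      if 0 ≤ nr ∧ nr < rows then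
        if cellA grid nr.toNat c ≠ 8 then (true, cellA grid nr.toNat c == 1)
        else drLoopA grid rows r c rest
      else drLoopA grid rows r c rest

-- 'for period_c in range(1, cols): …' (body does not depend on period_c; breaks when found)
def pcLoopA (grid : List (List Int)) (rows : Int) (r c : Nat) (pr : Int) : List Int → Bool × Bool
  | [] => (false, false)
  | _ :: rest =>
      let fm := drLoopA grid rows r c [-pr, pr]
      if fm.1 then fm else pcLoopA grid rows r c pr rest

-- 'for period_r in range(1, rows): …' — True iff result[r][c] is set to 3
def prLoopA (grid : List (List Int)) (rows cols : Int) (r c : Nat) : List Int → Bool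
  | [] => false
  | pr :: rest =>
      let fm := pcLoopA grid rows r c pr (PySem.List.pyRange 1 cols 1)
      if fm.1 then fm.2 else prLoopA grid rows cols r c rest

-- result[r][c] = v
def setCellA (res : List (List Int)) (r c : Nat) (v : Int) : List (List Int) :=
  res.set r ((res.getD r []).set c v)

def solve (grid : List (List Int)) : List (List Int) :=
  let rows := grid.length
  let cols := (grid.headD []).length
  let result := grid.map (fun row => row)
  let eights := (List.range rows).flatMap (fun r =>
      (List.range cols).filterMap (fun c => if cellA grid r c = 8 then some (r, c) else none))
  if eights = [] then result
  else
    -- A computes min_r/max_r/min_c/max_c of `eights` here but never uses them (dead code, cannot raise)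
    eights.foldl (fun res rc =>
      if prLoopA grid (rows : Int) (cols : Int) rc.1 rc.2 (PySem.List.pyRange 1 (rows : Int) 1)
      then setCellA res rc.1 rc.2 3 else res) result

-- ===== PORT B =====
-- col = [grid[r][c] for r in range(rows)]
def colB (grid : List (List Int)) (rows c : Nat) : List Int :=
  (List.range rows).map (fun r => (grid.getD r []).getD c 0)

-- downward sweep: n[r] = (distance, value) of nearest non-8 above
def sweepDown : List Int → Int → Option (Int × Int) → List (Option (Int × Int))
  | [], _, _ => []
  | v :: rest, r, last =>
      (match last with | some iw => some (r - iw.1, iw.2) | none => none)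
        :: sweepDown rest (r + 1) (if v ≠ 8 then some (r, v) else last)

-- upward sweep over the reversed (value, current entry) pairs: below wins only if strictly closer
def sweepUpRev : List (Int × Option (Int × Int)) → Int → Option (Int × Int) → List (Option (Int × Int))
  | [], _, _ => []
  | (v, cur) :: rest, r, last =>
      (match last with
       | some iw =>
           match cur with
           | none => some (iw.1 - r, iw.2)
           | some dw => if iw.1 - r < dw.1 then some (iw.1 - r, iw.2) else some dw
       | none => cur)
        :: sweepUpRev rest (r - 1) (if v ≠ 8 then some (r, v) else last)

def nearestCol (grid : List (List Int)) (rows c : Nat) : List (Option (Int × Int)) :=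
  let col := colB grid rows c
  let n1 := sweepDown col 0 none
  (sweepUpRev (col.zip n1).reverse ((rows : Int) - 1) none).reverse

def solve_alt (grid : List (List Int)) : List (List Int) :=
  let rows := grid.length
  let cols := (grid.headD []).length
  let nearest := (List.range cols).map (fun c => nearestCol grid rows c)
  (PySem.List.enumerate grid 0).map (fun p =>
    (PySem.List.enumerate p.2 0).map (fun q =>
      if (decide (q.1 < (cols : Int)) && (q.2 == (8 : Int)) &&
         (match PySem.List.pyGetD (PySem.List.pyGetD nearest q.1 []) p.1 none with
          | some dw => dw.2 == (1 : Int)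
          | none => false)) = true
      then (3 : Int) else q.2))

-- ===== PRECONDITION & SPEC =====
-- Pre_ excludes exactly the inputs on which A raises: the empty grid and grids with a row shorter
-- than the first row (IndexError while building `eights`), and one-column grids with ≥ 2 rows
-- containing an 8 (UnboundLocalError: `found` is never bound because range(1, cols) is empty).
def Pre_solve (grid : List (List Int)) : Prop :=
  grid ≠ [] ∧
  (∀ row ∈ grid, (grid.headD []).length ≤ row.length) ∧
  ¬((grid.headD []).length = 1 ∧ 2 ≤ grid.length ∧ ∃ row ∈ grid, row.headD 0 = 8)
instance (grid : List (List Int)) : Decidable (Pre_solve grid) := by unfold Pre_solve; infer_instance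
def pvWitness_solve : List (List Int) := [[1, 8, 1], [8, 8, 8], [1, 1, 2]]

def Spec_solve (grid : List (List Int)) (out : List (List Int)) : Prop := out = solve_alt grid
instance (grid : List (List Int)) (out : List (List Int)) : Decidable (Spec_solve grid out) := by unfold Spec_solve; infer_instance

-- ===== CLAIM (what is proved, stated in full; the proofs are below) =====
def Claim_equal_solve : Prop := ∀ (grid : List (List Int)), Dom_solve grid → Pre_solve grid → Spec_solve grid (solve grid)


-- ===== LEMMAS AND PROOFS =====

-- index of the nearest non-8 strictly above r (greatest i < r with col[i] ≠ 8)
def findAbove (col : List Int) : Nat → Option Nat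
  | 0 => none
  | k+1 => if col.getD k 0 ≠ 8 then some k else findAbove col k

-- index of the nearest non-8 strictly below r (least j > r with col[j] ≠ 8)
def findBelow (col : List Int) (r : Nat) : Option Nat :=
  (findAbove col.reverse (col.length - 1 - r)).map (fun i => col.length - 1 - i)

-- the (distance, value) of the vertically nearest non-8, ties to above — the common spec
def specNearest (col : List Int) (r : Nat) : Option (Int × Int) :=
  match findAbove col r, findBelow col r with
  | some i, some j => if ((j:Int) - r) < ((r:Int) - i) then some (((j:Int) - r), col.getD j 0) else some (((r:Int) - i), col.getD i 0)
  | some i, none => some (((r:Int) - i), col.getD i 0)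
  | none, some j => some (((j:Int) - r), col.getD j 0)
  | none, none => none

def hitB (col : List Int) (x : Int) : Bool :=
  decide (0 ≤ x) && decide (x < (col.length : Int)) && (col.getD x.toNat 0 != 8)

-- A's outward distance scan, abstracted to a single column
def searchCol (col : List Int) (r : Nat) : List Int → Option Int
  | [] => none
  | d :: rest =>
      if hitB col ((r : Int) - d) then some (col.getD ((r:Int) - d).toNat 0)
      else if hitB col ((r : Int) + d) then some (col.getD ((r:Int) + d).toNat 0)
      else searchCol col r rest

lemma hitB_eq_true_iff (col : List Int) (x : Int) :
    hitB col x = true ↔ (0 ≤ x ∧ x < (col.length:Int) ∧ col.getD x.toNat 0 ≠ 8) := by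
  simp [hitB, and_assoc]

lemma hitB_eq_false_of (col : List Int) (x : Int)
    (h : ¬(0 ≤ x ∧ x < (col.length:Int) ∧ col.getD x.toNat 0 ≠ 8)) : hitB col x = false := by
  rw [← Bool.not_eq_true, hitB_eq_true_iff]; exact h

lemma hitB_nat (col : List Int) (t : Nat) (ht : t < col.length) (h8 : col.getD t 0 ≠ 8) :
    hitB col (t : Int) = true := by
  rw [hitB_eq_true_iff]
  exact ⟨by omega, by exact_mod_cast ht, by simpa using h8⟩

-- ---- A-side: prLoopA equals searchCol ----

lemma drLoopA_of_fst_false (grid : List (List Int)) (rows : Int) (r c : Nat) (l : List Int)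
    (h : (drLoopA grid rows r c l).1 = false) : drLoopA grid rows r c l = (false, false) := by
  induction l with
  | nil => rfl
  | cons d rest ih =>
    simp only [drLoopA] at h ⊢ <;> split_ifs at h ⊢ <;> simp_all

lemma pcLoopA_eq (grid : List (List Int)) (rows : Int) (r c : Nat) (pr : Int) (l : List Int)
    (hl : l ≠ []) : pcLoopA grid rows r c pr l = drLoopA grid rows r c [-pr, pr] := by
  induction l with
  | nil => exact absurd rfl hl
  | cons x rest ih =>
    simp only [pcLoopA]
    by_cases h : (drLoopA grid rows r c [-pr, pr]).1 = true
    · simp [h]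
    · simp only [Bool.not_eq_true] at h
      rcases List.eq_nil_or_concat rest with h0 | _
      · simp [h0, pcLoopA, drLoopA_of_fst_false _ _ _ _ _ h, h]
      · have hne : rest ≠ [] := by rintro rfl; simp_all
        simp [ih hne, h]

lemma colB_length (grid : List (List Int)) (rows c : Nat) : (colB grid rows c).length = rows := by
  simp [colB]

lemma colB_getD (grid : List (List Int)) (rows c k : Nat) (hk : k < rows) :
    (colB grid rows c).getD k 0 = cellA grid k c := by
  rw [List.getD_eq_getElem _ _ (by simpa [colB_length] using hk)]
  simp [colB, cellA]

lemma prLoopA_eq_searchCol (grid : List (List Int)) (c cols : Nat) (h2 : 2 ≤ cols) (r : Nat)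
    (ds : List Int) :
    prLoopA grid (grid.length : Int) (cols : Int) r c ds =
      (match searchCol (colB grid grid.length c) r ds with
       | some v => v == (1:Int) | none => false) := by
  induction ds with
  | nil => rfl
  | cons d rest ih =>
    have hne : PySem.List.pyRange 1 (cols:Int) 1 ≠ [] := by
      rw [PySem.List.pyRange_one_cons (by exact_mod_cast h2 : (1:Int) < (cols:Int))]
      simp
    have hcl : (colB grid grid.length c).length = grid.length := colB_length _ _ _
    have hcell : ∀ x : Int, 0 ≤ x → x < (grid.length:Int) →
        (colB grid grid.length c).getD x.toNat 0 = cellA grid x.toNat c := by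
      intro x h0 h1
      exact colB_getD grid grid.length c x.toNat (by omega)
    simp only [prLoopA]
    rw [pcLoopA_eq _ _ _ _ _ _ hne]
    simp only [searchCol]
    by_cases hAb : hitB (colB grid grid.length c) ((r:Int) - d) = true
    · have hAb' := (hitB_eq_true_iff _ _).mp hAb
      rw [hcl] at hAb'
      obtain ⟨h0, h1, h8⟩ := hAb'
      rw [hcell _ h0 h1] at h8
      have hdr : drLoopA grid (grid.length:Int) r c [-d, d] =
          (true, cellA grid ((r:Int) - d).toNat c == 1) := by
        simp only [drLoopA]
        rw [show (r:Int) + -d = (r:Int) - d from by ring]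
        rw [if_pos (by constructor <;> omega), if_pos (by simpa using h8)]
      rw [hdr, hAb]
      simp only [if_true]
      rw [hcell _ h0 h1]
    · by_cases hBe : hitB (colB grid grid.length c) ((r:Int) + d) = true
      · have hBe' := (hitB_eq_true_iff _ _).mp hBe
        rw [hcl] at hBe'
        obtain ⟨h0, h1, h8⟩ := hBe'
        rw [hcell _ h0 h1] at h8
        have hAb' : ¬(0 ≤ (r:Int) - d ∧ (r:Int) - d < (grid.length:Int) ∧
            cellA grid ((r:Int) - d).toNat c ≠ 8) := by
          intro hcon
          apply hAb
          rw [hitB_eq_true_iff, hcl]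
          exact ⟨hcon.1, hcon.2.1, by rw [hcell _ hcon.1 hcon.2.1]; exact hcon.2.2⟩
        have hdr : drLoopA grid (grid.length:Int) r c [-d, d] =
            (true, cellA grid ((r:Int) + d).toNat c == 1) := by
          simp only [drLoopA]
          by_cases hin : 0 ≤ (r:Int) + -d ∧ (r:Int) + -d < (grid.length:Int)
          · rw [if_pos hin]
            have h8' : ¬(cellA grid ((r:Int) + -d).toNat c ≠ 8) := by
              intro hcon
              exact hAb' ⟨by omega, by omega, by
                have : (r:Int) + -d = (r:Int) - d := by ring
                rwa [this] at hcon⟩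
            rw [if_neg h8', if_pos (by constructor <;> omega), if_pos (by simpa using h8)]
          · have hin' : ¬(0 ≤ (r:Int) + -d ∧ (r:Int) + -d < (grid.length:Int)) := hin
            rw [if_neg hin', if_pos (by constructor <;> omega), if_pos (by simpa using h8)]
        rw [hdr]
        have hc2 : (colB grid grid.length c)[((r:Int)+d).toNat]?.getD 0 = cellA grid ((r:Int)+d).toNat c := by
          rw [← List.getD_eq_getElem?_getD]; exact hcell _ h0 h1
        simp [hAb, hBe, hc2]
      · -- both miss: recurse
        rw [Bool.not_eq_true] at hAb hBe
        have hdr : drLoopA grid (grid.length:Int) r c [-d, d] = (false, false) := by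
          apply drLoopA_of_fst_false
          simp only [drLoopA]
          have hAb' := hAb
          rw [← Bool.not_eq_true, hitB_eq_true_iff, hcl] at hAb'
          have hBe' := hBe
          rw [← Bool.not_eq_true, hitB_eq_true_iff, hcl] at hBe'
          by_cases hin : 0 ≤ (r:Int) + -d ∧ (r:Int) + -d < (grid.length:Int)
          · rw [if_pos hin]
            have h8' : ¬(cellA grid ((r:Int) + -d).toNat c ≠ 8) := by
              intro hcon
              apply hAb'
              refine ⟨by omega, by omega, ?_⟩
              rw [hcell _ (by omega) (by omega)]
              have : (r:Int) - d = (r:Int) + -d := by ring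
              rwa [this]
            rw [if_neg h8']
            by_cases hin2 : 0 ≤ (r:Int) + d ∧ (r:Int) + d < (grid.length:Int)
            · rw [if_pos hin2]
              have h8'' : ¬(cellA grid ((r:Int) + d).toNat c ≠ 8) := by
                intro hcon
                exact hBe' ⟨by omega, by omega, by rwa [hcell _ (by omega) (by omega)]⟩
              rw [if_neg h8'']
            · rw [if_neg hin2]
          · rw [if_neg hin]
            by_cases hin2 : 0 ≤ (r:Int) + d ∧ (r:Int) + d < (grid.length:Int)
            · rw [if_pos hin2]
              have h8'' : ¬(cellA grid ((r:Int) + d).toNat c ≠ 8) := by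
                intro hcon
                exact hBe' ⟨by omega, by omega, by rwa [hcell _ (by omega) (by omega)]⟩
              rw [if_neg h8'']
            · rw [if_neg hin2]
        rw [hdr]
        simp only [hAb, hBe, Bool.false_eq_true, if_false]
        exact ih

-- ---- searchCol on the full range equals specNearest ----

lemma searchCol_append (col : List Int) (r : Nat) (ds1 ds2 : List Int) :
    searchCol col r (ds1 ++ ds2) =
      (match searchCol col r ds1 with
       | some v => some v | none => searchCol col r ds2) := by
  induction ds1 with
  | nil => simp [searchCol]
  | cons d rest ih => simp only [List.cons_append, searchCol]; split_ifs <;> simp [ih]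

lemma searchCol_none (col : List Int) (r : Nat) (ds : List Int)
    (h : ∀ d ∈ ds, hitB col ((r:Int) - d) = false ∧ hitB col ((r:Int) + d) = false) :
    searchCol col r ds = none := by
  induction ds with
  | nil => rfl
  | cons d rest ih =>
    have := h d (by simp)
    simp only [searchCol, this.1, this.2, if_false]
    exact ih (fun d hd => h d (by simp [hd]))

lemma searchCol_range_split (col : List Int) (r : Nat) (n d0 : Int) (h1 : 1 ≤ d0) (h2 : d0 < n)
    (hmiss : ∀ d : Int, 1 ≤ d → d < d0 → hitB col ((r:Int) - d) = false ∧ hitB col ((r:Int) + d) = false) :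
    searchCol col r (PySem.List.pyRange 1 n 1) =
      (if hitB col ((r:Int) - d0) then some (col.getD ((r:Int) - d0).toNat 0)
       else if hitB col ((r:Int) + d0) then some (col.getD ((r:Int) + d0).toNat 0)
       else searchCol col r (PySem.List.pyRange (d0+1) n 1)) := by
  rw [PySem.List.pyRange_one_append 1 d0 n (by omega) (by omega), searchCol_append,
    searchCol_none col r _ (fun d hd => hmiss d (PySem.List.mem_pyRange_one.mp hd).1 (PySem.List.mem_pyRange_one.mp hd).2),
    PySem.List.pyRange_one_cons (by omega : d0 < n)]
  simp only [searchCol]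

lemma findAbove_spec_some (col : List Int) (r i : Nat) (h : findAbove col r = some i) :
    i < r ∧ col.getD i 0 ≠ 8 ∧ ∀ t, i < t → t < r → col.getD t 0 = 8 := by
  induction r with
  | zero => simp [findAbove] at h
  | succ k ih =>
    simp only [findAbove] at h
    split_ifs at h with hk
    · cases h
      exact ⟨Nat.lt_succ_self _, hk, fun t h1 h2 => by omega⟩
    · obtain ⟨h1, h2, h3⟩ := ih h
      refine ⟨by omega, h2, fun t ht1 ht2 => ?_⟩
      rcases Nat.lt_or_ge t k with h' | h'
      · exact h3 t ht1 h'
      · have : t = k := by omega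
        subst this; simpa using hk

lemma findAbove_spec_none (col : List Int) (r : Nat) (h : findAbove col r = none) :
    ∀ t, t < r → col.getD t 0 = 8 := by
  induction r with
  | zero => omega
  | succ k ih =>
    simp only [findAbove] at h
    split_ifs at h with hk
    · intro t ht
      rcases Nat.lt_or_ge t k with h' | h'
      · exact ih h t h'
      · have : t = k := by omega
        subst this; simpa using hk

lemma getD_reverse {α : Type} (col : List α) (k : Nat) (hk : k < col.length) (d : α) :
    col.reverse.getD k d = col.getD (col.length - 1 - k) d := by
  rw [List.getD_eq_getElem _ _ (by simpa using hk), List.getD_eq_getElem _ _ (by omega),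
    List.getElem_reverse]

lemma findBelow_spec_some (col : List Int) (r j : Nat) (hr : r < col.length)
    (h : findBelow col r = some j) :
    r < j ∧ j < col.length ∧ col.getD j 0 ≠ 8 ∧ ∀ t, r < t → t < j → col.getD t 0 = 8 := by
  unfold findBelow at h
  rcases hA : findAbove col.reverse (col.length - 1 - r) with _ | i <;> rw [hA] at h <;> simp at h
  obtain ⟨h1, h2, h3⟩ := findAbove_spec_some _ _ _ hA
  subst h
  have hi : i < col.length := by omega
  rw [getD_reverse col i hi] at h2
  refine ⟨by omega, by omega, h2, fun t ht1 ht2 => ?_⟩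
  have ht : t < col.length := by omega
  have := h3 (col.length - 1 - t) (by omega) (by omega)
  rw [getD_reverse col (col.length - 1 - t) (by omega)] at this
  have heq : col.length - 1 - (col.length - 1 - t) = t := by omega
  rwa [heq] at this

lemma findBelow_spec_none (col : List Int) (r : Nat) (hr : r < col.length)
    (h : findBelow col r = none) :
    ∀ t, r < t → t < col.length → col.getD t 0 = 8 := by
  unfold findBelow at h
  rcases hA : findAbove col.reverse (col.length - 1 - r) with _ | i <;> rw [hA] at h <;> simp at h
  intro t ht1 ht2
  have := findAbove_spec_none _ _ hA (col.length - 1 - t) (by omega)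
  rw [getD_reverse col (col.length - 1 - t) (by omega)] at this
  have heq : col.length - 1 - (col.length - 1 - t) = t := by omega
  rwa [heq] at this

lemma missAboveNone (col : List Int) (r : Nat) (hub : ∀ t, t < r → col.getD t 0 = 8)
    (d : Int) (hd : 1 ≤ d) : hitB col ((r:Int) - d) = false := by
  apply hitB_eq_false_of
  rintro ⟨h0, h1, h2⟩
  exact h2 (by rw [hub ((r:Int) - d).toNat (by omega)])

lemma missAboveSome (col : List Int) (r i : Nat)
    (hmax : ∀ t, i < t → t < r → col.getD t 0 = 8)
    (d : Int) (hd : 1 ≤ d) (hdi : d < (r:Int) - i) : hitB col ((r:Int) - d) = false := by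
  apply hitB_eq_false_of
  rintro ⟨h0, h1, h2⟩
  exact h2 (by rw [hmax ((r:Int) - d).toNat (by omega) (by omega)])

lemma missBelowNone (col : List Int) (r : Nat)
    (hlb : ∀ t, r < t → t < col.length → col.getD t 0 = 8)
    (d : Int) (hd : 1 ≤ d) : hitB col ((r:Int) + d) = false := by
  apply hitB_eq_false_of
  rintro ⟨h0, h1, h2⟩
  exact h2 (by rw [hlb ((r:Int) + d).toNat (by omega) (by omega)])

lemma missBelowSome (col : List Int) (r j : Nat)
    (hmax : ∀ t, r < t → t < j → col.getD t 0 = 8)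
    (d : Int) (hd : 1 ≤ d) (hdj : d < (j:Int) - r) : hitB col ((r:Int) + d) = false := by
  apply hitB_eq_false_of
  rintro ⟨h0, h1, h2⟩
  exact h2 (by rw [hmax ((r:Int) + d).toNat (by omega) (by omega)])

lemma searchCol_eq_specNearest (col : List Int) (r : Nat) (hr : r < col.length) :
    searchCol col r (PySem.List.pyRange 1 (col.length : Int) 1) = (specNearest col r).map (·.2) := by
  unfold specNearest
  rcases hA : findAbove col r with _ | i <;> rcases hB : findBelow col r with _ | j
  · -- no non-8 anywhere in the column
    have hub := findAbove_spec_none col r hA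
    have hlb := findBelow_spec_none col r hr hB
    rw [searchCol_none col r _ (fun d hd => ?_)]
    · simp
    · rw [PySem.List.mem_pyRange_one] at hd
      exact ⟨missAboveNone col r hub d hd.1, missBelowNone col r hlb d hd.1⟩
  · -- only below
    have hub := findAbove_spec_none col r hA
    obtain ⟨hj1, hj2, hj8, hjmax⟩ := findBelow_spec_some col r j hr hB
    rw [searchCol_range_split col r _ ((j:Int) - r) (by omega) (by push_cast; omega)
      (fun d hd1 hd2 => ⟨missAboveNone col r hub d hd1, missBelowSome col r j hjmax d hd1 hd2⟩)]
    rw [missAboveNone col r hub _ (by omega)]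
    have hx : (r:Int) + ((j:Int) - r) = (j:Int) := by ring
    rw [hx, hitB_nat col j hj2 hj8]
    simp
  · -- only above
    obtain ⟨hi1, hi8, himax⟩ := findAbove_spec_some col r i hA
    have hlb := findBelow_spec_none col r hr hB
    rw [searchCol_range_split col r _ ((r:Int) - i) (by omega) (by push_cast; omega)
      (fun d hd1 hd2 => ⟨missAboveSome col r i himax d hd1 hd2, missBelowNone col r hlb d hd1⟩)]
    have hx : (r:Int) - ((r:Int) - i) = (i:Int) := by ring
    rw [hx, hitB_nat col i (by omega) hi8]
    simp
  · -- both
    obtain ⟨hi1, hi8, himax⟩ := findAbove_spec_some col r i hA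
    obtain ⟨hj1, hj2, hj8, hjmax⟩ := findBelow_spec_some col r j hr hB
    by_cases hcmp : ((j:Int) - r) < ((r:Int) - i)
    · rw [searchCol_range_split col r _ ((j:Int) - r) (by omega) (by push_cast; omega)
        (fun d hd1 hd2 => ⟨missAboveSome col r i himax d hd1 (by omega), missBelowSome col r j hjmax d hd1 hd2⟩)]
      rw [missAboveSome col r i himax _ (by omega) (by omega)]
      have hx : (r:Int) + ((j:Int) - r) = (j:Int) := by ring
      rw [hx, hitB_nat col j hj2 hj8]
      simp [hcmp]
    · rw [searchCol_range_split col r _ ((r:Int) - i) (by omega) (by push_cast; omega)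
        (fun d hd1 hd2 => ⟨missAboveSome col r i himax d hd1 hd2, missBelowSome col r j hjmax d hd1 (by omega)⟩)]
      have hx : (r:Int) - ((r:Int) - i) = (i:Int) := by ring
      rw [hx, hitB_nat col i (by omega) hi8]
      simp [hcmp]

-- ---- B-side: the two sweeps compute specNearest ----

lemma findAbove_cons (v : Int) (rest : List Int) (k : Nat) :
    findAbove (v :: rest) (k+1) =
      (match findAbove rest k with
       | some i => some (i+1)
       | none => if v ≠ 8 then some 0 else none) := by
  induction k with
  | zero => simp [findAbove]
  | succ m ih =>
    show (if (v :: rest).getD (m+1) 0 ≠ 8 then some (m+1) else findAbove (v :: rest) (m+1)) = _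
    rw [ih]
    have : (v :: rest).getD (m+1) 0 = rest.getD m 0 := by simp
    rw [this]
    show _ = (match (if rest.getD m 0 ≠ 8 then some m else findAbove rest m) with
              | some i => some (i+1) | none => if v ≠ 8 then some 0 else none)
    rcases eq_or_ne (rest.getD m 0) 8 with h8 | h8 <;>
      simp only [List.getD_eq_getElem?_getD] at h8 <;> simp [h8]

lemma sweepDown_length (col : List Int) (r0 : Int) (last : Option (Int × Int)) :
    (sweepDown col r0 last).length = col.length := by
  induction col generalizing r0 last with
  | nil => rfl
  | cons v rest ih => simp [sweepDown, ih]

lemma sweepDown_getD (col : List Int) (r0 : Int) (last : Option (Int × Int)) (k : Nat)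
    (hk : k < col.length) :
    (sweepDown col r0 last).getD k none =
      (match findAbove col k with
       | some i => some (((k:Int) - (i:Int)), col.getD i 0)
       | none => last.map (fun iw => (r0 + (k:Int) - iw.1, iw.2))) := by
  induction col generalizing r0 last k with
  | nil => simp at hk
  | cons v rest ih =>
    cases k with
    | zero =>
      show (match last with | some iw => some (r0 - iw.1, iw.2) | none => none) = _
      simp only [findAbove]
      cases last <;> simp
    | succ m =>
      have hm : m < rest.length := by simpa using hk
      show (sweepDown rest (r0+1) (if v ≠ 8 then some (r0, v) else last)).getD m none = _
      rw [ih _ _ _ hm, findAbove_cons]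
      rcases hA : findAbove rest m with _ | i
      · rcases eq_or_ne v 8 with h8 | h8
        · subst h8
          simp only [ne_eq, not_true_eq_false, if_false]
          cases last with
          | none => simp
          | some iw =>
              simp only [Option.map_some, Option.some.injEq, Prod.mk.injEq]
              exact ⟨by push_cast; ring, trivial⟩
        · simp only [h8, ne_eq, not_false_eq_true, if_true, List.getD_cons_zero,
            Option.map_some, Option.some.injEq, Prod.mk.injEq]
          exact ⟨by push_cast; ring, trivial⟩
      · simp only [List.getD_cons_succ, Option.some.injEq, Prod.mk.injEq]
        exact ⟨by push_cast; ring, trivial⟩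

def combineB (last cur : Option (Int × Int)) (r : Int) : Option (Int × Int) :=
  match last with
  | some iw =>
      match cur with
      | none => some (iw.1 - r, iw.2)
      | some dw => if iw.1 - r < dw.1 then some (iw.1 - r, iw.2) else some dw
  | none => cur

lemma sweepUpRev_length (l : List (Int × Option (Int × Int))) (r0 : Int) (last : Option (Int × Int)) :
    (sweepUpRev l r0 last).length = l.length := by
  induction l generalizing r0 last with
  | nil => rfl
  | cons p rest ih => cases p; simp [sweepUpRev, ih]

lemma sweepUpRev_getD (l : List (Int × Option (Int × Int))) (r0 : Int) (last : Option (Int × Int))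
    (k : Nat) (hk : k < l.length) :
    (sweepUpRev l r0 last).getD k none =
      combineB
        (match findAbove (l.map Prod.fst) k with
         | some i => some (r0 - (i:Int), (l.getD i (0, none)).1)
         | none => last)
        ((l.getD k (0, none)).2)
        (r0 - (k:Int)) := by
  induction l generalizing r0 last k with
  | nil => simp at hk
  | cons p rest ih =>
    obtain ⟨v, cur⟩ := p
    cases k with
    | zero =>
      simp only [sweepUpRev, List.getD_cons_zero, List.map_cons, findAbove, combineB]
      cases last <;> cases cur <;> simp
    | succ m =>
      have hm : m < rest.length := by simpa using hk
      simp only [sweepUpRev, List.getD_cons_succ]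
      rw [ih _ _ _ hm]
      have hmap : ((v, cur) :: rest).map Prod.fst = v :: rest.map Prod.fst := by simp
      rw [hmap, findAbove_cons]
      rcases hA : findAbove (rest.map Prod.fst) m with _ | i
      · rcases eq_or_ne v 8 with h8 | h8
        · subst h8
          simp only [ne_eq, not_true_eq_false, if_false, List.getD_cons_succ]
          have : r0 - 1 - (m:Int) = r0 - ((m:Nat)+1 : Nat) := by push_cast; ring
          rw [this]
        · simp only [h8, ne_eq, not_false_eq_true, if_true, List.getD_cons_zero, List.getD_cons_succ]
          have h1 : r0 - 1 - (m:Int) = r0 - ((m:Nat)+1 : Nat) := by push_cast; ring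
          have h2 : r0 - (0:Nat) = r0 := by simp
          rw [h1]
          simp
      · simp only [List.getD_cons_succ]
        have h1 : r0 - 1 - (m:Int) = r0 - ((m:Nat)+1 : Nat) := by push_cast; ring
        have h2 : r0 - 1 - (i:Int) = r0 - ((i:Nat)+1 : Nat) := by push_cast; ring
        rw [h1, h2]

lemma getD_zip {α β : Type} (as : List α) (bs : List β) (t : Nat) (h1 : t < as.length)
    (h2 : t < bs.length) (d1 : α) (d2 : β) :
    (as.zip bs).getD t (d1, d2) = (as.getD t d1, bs.getD t d2) := by
  rw [List.getD_eq_getElem _ _ (by simp; omega), List.getD_eq_getElem _ _ h1,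
    List.getD_eq_getElem _ _ h2, List.getElem_zip]

lemma nearestCol_getD (grid : List (List Int)) (rows c r : Nat) (hr : r < rows) :
    (nearestCol grid rows c).getD r none = specNearest (colB grid rows c) r := by
  unfold nearestCol
  have hclen : (colB grid rows c).length = rows := colB_length grid rows c
  set col := colB grid rows c with hcol
  set n1 := sweepDown col 0 none with hn1
  have hn1len : n1.length = rows := by rw [hn1, sweepDown_length, hclen]
  have hzlen : (col.zip n1).length = rows := by simp [hclen, hn1len]
  have hrevlen : ((col.zip n1).reverse).length = rows := by simp [hzlen]
  have hsulen : (sweepUpRev (col.zip n1).reverse ((rows:Int)-1) none).length = rows := by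
    rw [sweepUpRev_length]; exact hrevlen
  set k := rows - 1 - r with hkdef
  rw [getD_reverse _ r (by rw [hsulen]; exact hr) none, hsulen,
    sweepUpRev_getD _ _ _ (rows - 1 - r) (by rw [hrevlen]; omega)]
  have hmapfst : ((col.zip n1).reverse).map Prod.fst = col.reverse := by
    rw [List.map_reverse, List.map_fst_zip (by omega)]
  rw [hmapfst]
  have hgetk : ((col.zip n1).reverse).getD (rows - 1 - r) (0, none) = (col.getD r 0, n1.getD r none) := by
    rw [getD_reverse _ _ (by rw [hzlen]; omega) (0, none), hzlen,
      show rows - 1 - (rows - 1 - r) = r from by omega,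
      getD_zip _ _ r (by omega) (by omega)]
  rw [hgetk]
  have hrpos : (rows:Int) - 1 - ((rows - 1 - r : Nat) : Int) = (r:Int) := by push_cast; omega
  rw [hrpos]
  have hfb : findBelow col r = (findAbove col.reverse (rows - 1 - r)).map (fun i => rows - 1 - i) := by
    unfold findBelow
    rw [hclen]
  rw [sweepDown_getD col 0 none r (by omega)]
  unfold specNearest
  rcases hFB : findAbove col.reverse (rows - 1 - r) with _ | i
  · rw [hfb, hFB]
    simp only [Option.map_none]
    rcases hFA : findAbove col r with _ | i2 <;> simp [combineB]
  · have hi : i < rows - 1 - r := (findAbove_spec_some _ _ _ hFB).1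
    rw [hfb, hFB]
    simp only [Option.map_some]
    have hval : (col.reverse.getD i 0) = col.getD (rows - 1 - i) 0 := by
      rw [getD_reverse _ _ (by omega) 0, hclen]
    have hidx : (rows:Int) - 1 - (i:Int) = ((rows - 1 - i : Nat) : Int) := by push_cast; omega
    have hcolrev : ((col.zip n1).reverse).getD i (0, none) = (col.getD (rows - 1 - i) 0, n1.getD (rows - 1 - i) none) := by
      rw [getD_reverse _ _ (by rw [hzlen]; omega) (0, none), hzlen,
        getD_zip _ _ _ (by omega) (by omega)]
    rw [hcolrev, hidx]
    rcases hFA : findAbove col r with _ | i2 <;> simp [combineB]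

-- ---- A: the fold over eights, pointwise ----

lemma getD_set_outer (res : List (List Int)) (r : Nat) (row : List Int) (i : Nat) :
    (res.set r row).getD i [] = if i = r ∧ r < res.length then row else res.getD i [] := by
  simp only [List.getD_eq_getElem?_getD, List.getElem?_set]
  split_ifs with h1 h2 h3 <;> simp_all <;> omega

lemma getD_set_inner (row : List Int) (c : Nat) (v : Int) (j : Nat) :
    (row.set c v).getD j 0 = if j = c ∧ c < row.length then v else row.getD j 0 := by
  simp only [List.getD_eq_getElem?_getD, List.getElem?_set]
  split_ifs with h1 h2 h3 <;> simp_all <;> omega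

lemma setCellA_length (res : List (List Int)) (r c : Nat) (v : Int) :
    (setCellA res r c v).length = res.length := by simp [setCellA]

lemma setCellA_row_length (res : List (List Int)) (r c : Nat) (v : Int) (i : Nat) :
    ((setCellA res r c v).getD i []).length = (res.getD i []).length := by
  unfold setCellA
  rw [getD_set_outer]
  split_ifs with h
  · rcases h with ⟨rfl, _⟩; simp
  · rfl

lemma setCellA_getD (res : List (List Int)) (r c : Nat) (v : Int) (i j : Nat) :
    ((setCellA res r c v).getD i []).getD j 0 =
      if i = r ∧ j = c ∧ r < res.length ∧ c < (res.getD r []).length then v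
      else (res.getD i []).getD j 0 := by
  unfold setCellA
  rw [getD_set_outer]
  split_ifs with h1 h2 h3 h4
  · obtain ⟨rfl, -⟩ := h1
    rw [getD_set_inner]
    rw [if_pos ⟨h2.2.1, h2.2.2.2⟩]
  · obtain ⟨rfl, hlt⟩ := h1
    rw [getD_set_inner]
    rw [if_neg (by tauto)]
  · exact absurd ⟨h3.1, h3.2.2.1⟩ h1
  · rfl

lemma foldA_length (f : Nat × Nat → Bool) (ps : List (Nat × Nat)) (init : List (List Int)) :
    (ps.foldl (fun res rc => if f rc then setCellA res rc.1 rc.2 3 else res) init).length = init.length := by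
  induction ps generalizing init with
  | nil => rfl
  | cons p rest ih =>
    simp only [List.foldl_cons]
    rw [ih]
    split_ifs <;> simp [setCellA_length]

lemma foldA_row_length (f : Nat × Nat → Bool) (ps : List (Nat × Nat)) (init : List (List Int)) (i : Nat) :
    ((ps.foldl (fun res rc => if f rc then setCellA res rc.1 rc.2 3 else res) init).getD i []).length = (init.getD i []).length := by
  induction ps generalizing init with
  | nil => rfl
  | cons p rest ih =>
    simp only [List.foldl_cons]
    rw [ih]
    split_ifs
    · exact setCellA_row_length _ _ _ _ _
    · rfl

lemma foldA_getD (f : Nat × Nat → Bool) (ps : List (Nat × Nat)) (init : List (List Int)) (i j : Nat) :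
    (((ps.foldl (fun res rc => if f rc then setCellA res rc.1 rc.2 3 else res) init).getD i []).getD j 0) =
      if (i, j) ∈ ps ∧ f (i, j) = true ∧ i < init.length ∧ j < (init.getD i []).length then 3
      else (init.getD i []).getD j 0 := by
  induction ps generalizing init with
  | nil => simp
  | cons p rest ih =>
    simp only [List.foldl_cons]
    rw [ih]
    have hlen : (if f p = true then setCellA init p.1 p.2 3 else init).length = init.length := by
      split_ifs <;> simp [setCellA_length]
    have hrow : ((if f p = true then setCellA init p.1 p.2 3 else init).getD i []).length = (init.getD i []).length := by
      split_ifs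
      · exact setCellA_row_length _ _ _ _ _
      · rfl
    rw [hlen, hrow]
    by_cases hf : f p = true
    · rw [if_pos hf, setCellA_getD]
      obtain ⟨p1, p2⟩ := p
      by_cases hip : i = p1 ∧ j = p2
      · obtain ⟨rfl, rfl⟩ := hip
        by_cases hrange : i < init.length ∧ j < (init.getD i []).length
        · conv_rhs => rw [if_pos ⟨List.mem_cons_self, hf, hrange⟩]
          split_ifs with hA hB
          · rfl
          · rfl
          · exact absurd ⟨rfl, rfl, hrange.1, hrange.2⟩ hB
        · rw [if_neg (by tauto), if_neg (by tauto), if_neg (by tauto)]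
      · have hne : (i, j) ≠ (p1, p2) := by simp [Prod.ext_iff]; tauto
        have h2 : ¬(i = p1 ∧ j = p2 ∧ p1 < init.length ∧ p2 < (init.getD p1 []).length) := by tauto
        rw [if_neg h2]
        simp only [List.mem_cons, hne, false_or]
    · rw [if_neg hf]
      have : ((i, j) ∈ p :: rest ∧ f (i, j) = true ∧ i < init.length ∧ j < (init.getD i []).length)
           ↔ ((i, j) ∈ rest ∧ f (i, j) = true ∧ i < init.length ∧ j < (init.getD i []).length) := by
        simp only [List.mem_cons]
        constructor
        · rintro ⟨h1 | h1, h2, h3⟩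
          · exact absurd (h1 ▸ h2) hf
          · exact ⟨h1, h2, h3⟩
        · tauto
      simp only [this]

-- ---- assembly ----

lemma mem_eights (grid : List (List Int)) (i j : Nat) :
    ((i, j) ∈ (List.range grid.length).flatMap (fun r =>
      (List.range (grid.headD []).length).filterMap (fun c => if cellA grid r c = 8 then some (r, c) else none)))
      ↔ (i < grid.length ∧ j < (grid.headD []).length ∧ cellA grid i j = 8) := by
  simp only [List.mem_flatMap, List.mem_filterMap, List.mem_range,
    Option.ite_none_right_eq_some, Option.some.injEq, Prod.mk.injEq]
  constructor
  · rintro ⟨r, hr, c, hc, h8, rfl, rfl⟩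
    exact ⟨hr, hc, h8⟩
  · rintro ⟨hi, hj, h8⟩
    exact ⟨i, hi, j, hj, h8, rfl, rfl⟩

lemma cell_cond_eq (grid : List (List Int)) (hpre : Pre_solve grid) (i j : Nat)
    (hi : i < grid.length) :
    ((j < (grid.headD []).length ∧ cellA grid i j = 8 ∧
        prLoopA grid (grid.length : Int) ((grid.headD []).length : Int) i j
          (PySem.List.pyRange 1 (grid.length : Int) 1) = true)
      ↔ (j < (grid.headD []).length ∧ cellA grid i j = 8 ∧
          (match specNearest (colB grid grid.length j) i with
           | some dw => dw.2 == (1:Int) | none => false) = true)) := by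
  obtain ⟨hne, hlen, hq⟩ := hpre
  have hq8 : ∀ i, i < grid.length → (grid.headD []).length = 1 → 2 ≤ grid.length →
      cellA grid i 0 = 8 → False := by
    intro i hi hj1 hr2 h8
    apply hq
    refine ⟨hj1, hr2, grid.getD i [], ?_, ?_⟩
    · rw [List.getD_eq_getElem _ _ hi]
      exact List.getElem_mem hi
    · have hh : (grid.getD i []).headD 0 = (grid.getD i []).getD 0 0 := by
        cases grid.getD i [] <;> rfl
      rw [hh]
      exact h8
  rcases Nat.lt_or_ge (grid.headD []).length 2 with hc1 | hc2
  · -- at most one column: under Pre_ no 8 is reachable unless the grid has one row,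
    -- and then neither side marks anything
    constructor <;> rintro ⟨hj, h8, hP⟩ <;> exfalso <;>
        rcases Nat.lt_or_ge grid.length 2 with hr1 | hr2
    · have hi0 : i = 0 := by omega
      subst hi0
      rw [show ((grid.length:Int)) = 1 from by omega,
        PySem.List.pyRange_one_eq_nil (by omega)] at hP
      simp [prLoopA] at hP
    · exact hq8 i hi (by omega) hr2 (by rwa [show j = 0 from by omega] at h8)
    · have hi0 : i = 0 := by omega
      have hj0 : j = 0 := by omega
      subst hi0; subst hj0
      have hspec : specNearest (colB grid grid.length 0) 0 = none := by
        unfold specNearest findBelow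
        rw [colB_length, show grid.length - 1 - 0 = 0 from by omega]
        rfl
      rw [hspec] at hP
      simp at hP
    · exact hq8 i hi (by omega) hr2 (by rwa [show j = 0 from by omega] at h8)
  · have hs : searchCol (colB grid grid.length j) i (PySem.List.pyRange 1 (grid.length:Int) 1)
        = (specNearest (colB grid grid.length j) i).map (·.2) := by
      have h := searchCol_eq_specNearest (colB grid grid.length j) i
        (by rw [colB_length]; exact hi)
      rwa [colB_length] at h
    constructor <;> rintro ⟨hj, h8, hP⟩ <;> refine ⟨hj, h8, ?_⟩
    · rw [prLoopA_eq_searchCol grid j _ hc2 i, hs] at hP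
      rcases hsp : specNearest (colB grid grid.length j) i with _ | dw
      · rw [hsp] at hP
        simp at hP
      · rw [hsp] at hP
        simp only [Option.map_some] at hP
        simp [hsp, hP]
    · rw [prLoopA_eq_searchCol grid j _ hc2 i, hs]
      rcases hsp : specNearest (colB grid grid.length j) i with _ | dw
      · rw [hsp] at hP
        simp at hP
      · rw [hsp] at hP
        simp at hP
        simp [hP]

-- ---- entries of solve and solve_alt ----

lemma solve_length (grid : List (List Int)) : (solve grid).length = grid.length := by
  unfold solve
  dsimp only []
  split_ifs
  · simp
  · rw [foldA_length]
    simp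

lemma solve_row_length (grid : List (List Int)) (i : Nat) :
    ((solve grid).getD i []).length = (grid.getD i []).length := by
  unfold solve
  dsimp only []
  split_ifs
  · rw [List.map_id']
  · rw [foldA_row_length]
    rw [List.map_id']

lemma solve_getD (grid : List (List Int)) (i j : Nat) :
    ((solve grid).getD i []).getD j 0 =
      if ((i, j) ∈ (List.range grid.length).flatMap (fun r =>
            (List.range (grid.headD []).length).filterMap (fun c =>
              if cellA grid r c = 8 then some (r, c) else none)) ∧
          prLoopA grid (grid.length : Int) ((grid.headD []).length : Int) i j
            (PySem.List.pyRange 1 (grid.length : Int) 1) = true ∧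
          i < grid.length ∧ j < (grid.getD i []).length) then 3
      else (grid.getD i []).getD j 0 := by
  unfold solve
  dsimp only []
  by_cases hE : (List.range grid.length).flatMap (fun r =>
      (List.range (grid.headD []).length).filterMap (fun c =>
        if cellA grid r c = 8 then some (r, c) else none)) = []
  · rw [if_pos hE, List.map_id', hE]
    simp
  · rw [if_neg hE, List.map_id']
    exact foldA_getD (fun rc => prLoopA grid (grid.length : Int) ((grid.headD []).length : Int)
      rc.1 rc.2 (PySem.List.pyRange 1 (grid.length : Int) 1)) _ grid i j

lemma solve_alt_row (grid : List (List Int)) (i : Nat) (hi : i < grid.length) :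
    (solve_alt grid).getD i [] =
      (PySem.List.enumerate grid[i] 0).map (fun q =>
        if (decide (q.1 < ((grid.headD []).length : Int)) && (q.2 == (8 : Int)) &&
           (match PySem.List.pyGetD
              (PySem.List.pyGetD ((List.range (grid.headD []).length).map
                (fun c => nearestCol grid grid.length c)) q.1 []) ((0:Int) + (i:Int)) none with
            | some dw => dw.2 == (1 : Int)
            | none => false)) = true
        then (3 : Int) else q.2) := by
  unfold solve_alt
  rw [List.getD_eq_getElem _ _ (by simpa using hi)]
  rw [List.getElem_map, PySem.List.getElem_enumerate]

lemma solve_alt_length (grid : List (List Int)) : (solve_alt grid).length = grid.length := by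
  unfold solve_alt
  simp

lemma solve_alt_row_length (grid : List (List Int)) (i : Nat) :
    ((solve_alt grid).getD i []).length = (grid.getD i []).length := by
  rcases Nat.lt_or_ge i grid.length with hi | hi
  · rw [solve_alt_row grid i hi]
    rw [List.getD_eq_getElem _ _ hi]
    simp
  · rw [List.getD_eq_default _ _ (by rw [solve_alt_length]; exact hi),
      List.getD_eq_default _ _ hi]

lemma solve_alt_getD_lt (grid : List (List Int)) (i j : Nat) (hi : i < grid.length)
    (hj : j < (grid.getD i []).length) (hjc : j < (grid.headD []).length) :
    ((solve_alt grid).getD i []).getD j 0 =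
      if (((grid.getD i []).getD j 0 == (8:Int)) &&
          (match (nearestCol grid grid.length j).getD i none with
           | some dw => dw.2 == (1:Int)
           | none => false)) = true
      then 3 else (grid.getD i []).getD j 0 := by
  rw [solve_alt_row grid i hi]
  have hj' : j < (grid[i]).length := by rwa [List.getD_eq_getElem _ _ hi] at hj
  rw [List.getD_eq_getElem _ _ (by simpa using hj'), List.getElem_map,
    PySem.List.getElem_enumerate]
  have e1 : (0:Int) + (j:Int) = (j:Int) := zero_add _
  rw [e1]
  have e2 : PySem.List.pyGetD ((List.range (grid.headD []).length).map
      (fun c => nearestCol grid grid.length c)) (j:Int) [] = nearestCol grid grid.length j := by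
    rw [PySem.List.pyGetD_natCast, List.getD_eq_getElem _ _ (by simpa using hjc),
      List.getElem_map, List.getElem_range]
  rw [e2]
  have e3 : PySem.List.pyGetD (nearestCol grid grid.length j) ((0:Int) + (i:Int)) none
      = (nearestCol grid grid.length j).getD i none := by
    rw [zero_add, PySem.List.pyGetD_natCast]
  rw [e3]
  have hd : decide ((j:Int) < ((grid.headD []).length : Int)) = true := by
    simp only [decide_eq_true_eq]
    exact_mod_cast hjc
  rw [hd, Bool.true_and, List.getD_eq_getElem _ _ hi, List.getD_eq_getElem _ _ hj']

lemma solve_alt_getD_ge (grid : List (List Int)) (i j : Nat) (hi : i < grid.length)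
    (hj : j < (grid.getD i []).length) (hjc : (grid.headD []).length ≤ j) :
    ((solve_alt grid).getD i []).getD j 0 = (grid.getD i []).getD j 0 := by
  rw [solve_alt_row grid i hi]
  have hj' : j < (grid[i]).length := by rwa [List.getD_eq_getElem _ _ hi] at hj
  rw [List.getD_eq_getElem _ _ (by simpa using hj'), List.getElem_map,
    PySem.List.getElem_enumerate]
  have e1 : (0:Int) + (j:Int) = (j:Int) := zero_add _
  rw [e1]
  have hd : decide ((j:Int) < ((grid.headD []).length : Int)) = false := by
    simp only [decide_eq_false_iff_not, not_lt]
    exact_mod_cast hjc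
  rw [hd, Bool.false_and, Bool.false_and, List.getD_eq_getElem _ _ hi,
    List.getD_eq_getElem _ _ hj']
  simp

theorem solve_eq_solve_alt (grid : List (List Int)) (hpre : Pre_solve grid) :
    solve grid = solve_alt grid := by
  apply List.ext_getElem (by rw [solve_length, solve_alt_length])
  intro i h1 h2
  have hi : i < grid.length := by rwa [solve_length] at h1
  apply List.ext_getElem
  · rw [← List.getD_eq_getElem _ _ h1, ← List.getD_eq_getElem _ _ h2,
      solve_row_length, solve_alt_row_length]
  intro j hj1 hj2
  have hj : j < (grid.getD i []).length := by
    rw [← List.getD_eq_getElem _ _ h1, solve_row_length] at hj1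
    exact hj1
  have eL : (solve grid)[i][j] = ((solve grid).getD i []).getD j 0 := by
    rw [List.getD_eq_getElem _ _ h1, List.getD_eq_getElem _ _ hj1]
  have eR : (solve_alt grid)[i][j] = ((solve_alt grid).getD i []).getD j 0 := by
    rw [List.getD_eq_getElem _ _ h2, List.getD_eq_getElem _ _ hj2]
  rw [eL, eR, solve_getD]
  rcases Nat.lt_or_ge j (grid.headD []).length with hjc | hjc
  · rw [solve_alt_getD_lt grid i j hi hj hjc]
    rw [nearestCol_getD grid grid.length j i hi]
    have hcc := cell_cond_eq grid hpre i j hi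
    by_cases hcond : j < (grid.headD []).length ∧ cellA grid i j = 8 ∧
        prLoopA grid (grid.length : Int) ((grid.headD []).length : Int) i j
          (PySem.List.pyRange 1 (grid.length : Int) 1) = true
    · rw [if_pos ⟨(mem_eights grid i j).mpr ⟨hi, hjc, hcond.2.1⟩, hcond.2.2, hi, hj⟩]
      obtain ⟨-, h8, hspec⟩ := hcc.mp hcond
      rw [if_pos (by rw [show (grid.getD i []).getD j 0 = cellA grid i j from rfl, h8, hspec]; rfl)]
    · rw [if_neg (fun hcon => hcond ⟨hjc, ((mem_eights grid i j).mp hcon.1).2.2, hcon.2.1⟩)]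
      rw [if_neg (fun hcon => ?_)]
      rw [Bool.and_eq_true, beq_iff_eq] at hcon
      exact hcond (hcc.mpr ⟨hjc, hcon.1, hcon.2⟩)
  · rw [solve_alt_getD_ge grid i j hi hj hjc]
    rw [if_neg (fun hcon => by
      have := (mem_eights grid i j).mp hcon.1
      omega)]

-- ===== VERDICT (by name: the statement is the Claim_ definition above) =====
theorem solve_spec : Claim_equal_solve := by
  intro grid _ hpre
  unfold Spec_solve
  exact solve_eq_solve_alt grid hpre
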